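-- pv_equiv track=rewrite | github.com/DHCross/book-md-tools | tools/long_line_detector.py | apply_breaks
-- ===== SOURCE A (Python) =====
-- from typing import List, Tuple, Dict, Optional
--
-- def apply_breaks(text: str, break_positions: List[int]) -> str:
--     """Apply paragraph breaks at specified positions."""
--     if not break_positions:
--         return text
--
--     # Detect if this is a blockquote line
--     original_text = text
--     is_blockquote = text.strip().startswith('>')
--     blockquote_prefix = ''
--     content_start_pos = 0
--
--     if is_blockquote:
--         # Extract the blockquote prefix and any indentation
--         stripped = text.lstrip()
--         blockquote_prefix = text[:len(text) - len(stripped)]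
--         if stripped.startswith('>'):
--             blockquote_prefix += '> '
--             content_start_pos = len(text) - len(stripped) + 1
--             # Skip any spaces after the >
--             while content_start_pos < len(text) and text[content_start_pos] == ' ':
--                 content_start_pos += 1
--             text = text[content_start_pos:]  # Extract just the content
--             # Adjust break positions to account for removed prefix
--             break_positions = [pos - content_start_pos for pos in break_positions if pos > content_start_pos]
--
--     result = []
--     last_pos = 0
--
--     for pos in sorted(break_positions):
--         if pos > 0 and pos < len(text):
--             chunk = text[last_pos:pos].strip()
--             if chunk:
--                 if is_blockquote:
--                     result.append(blockquote_prefix + chunk)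
--                 else:
--                     result.append(chunk)
--             last_pos = pos
--
--     # Add remaining text
--     if last_pos < len(text):
--         chunk = text[last_pos:].strip()
--         if chunk:
--             if is_blockquote:
--                 result.append(blockquote_prefix + chunk)
--             else:
--                 result.append(chunk)
--
--     # If no valid breaks were made, return original text
--     if not result:
--         return original_text
--
--     # Join with double newlines (paragraph breaks)
--     return '\n\n'.join(part for part in result if part.strip())
-- ===== SOURCE B (Python) =====
-- def apply_breaks(text: str, break_positions):
--     """Apply paragraph breaks at specified positions."""
--     if not break_positions:
--         return text
--
--     original_text = text
--     is_blockquote = text.strip().startswith('>')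
--     blockquote_prefix = ''
--
--     if is_blockquote:
--         stripped = text.lstrip()
--         blockquote_prefix = text[:len(text) - len(stripped)]
--         if stripped.startswith('>'):
--             blockquote_prefix += '> '
--             content_start_pos = len(text) - len(stripped) + 1
--             while content_start_pos < len(text) and text[content_start_pos] == ' ':
--                 content_start_pos += 1
--             text = text[content_start_pos:]
--             break_positions = [pos - content_start_pos for pos in break_positions if pos > content_start_pos]
--
--     # Single streaming pass: no sorting, no slicing.  A hash set of valid cut
--     # indices drives a character-by-character scan that accumulates the current
--     # segment in a buffer and flushes it whenever the index is a cut point.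
--     cuts = {p for p in break_positions if 0 < p < len(text)}
--     parts = []
--     buf = []
--     for i, ch in enumerate(text):
--         if i in cuts:
--             seg = ''.join(buf).strip()
--             if seg:
--                 parts.append(blockquote_prefix + seg if is_blockquote else seg)
--             buf = []
--         buf.append(ch)
--     seg = ''.join(buf).strip()
--     if seg:
--         parts.append(blockquote_prefix + seg if is_blockquote else seg)
--
--     return '\n\n'.join(parts) if parts else original_text
-- ===== Notes on version B (the rewrite author's own statement) =====
-- stated objective: alternative
-- what changed: Replaces sort-the-positions plus slice-between-cursor splitting by a single character-streaming pass: a hash set of the valid break indices drives an enumerate scan that accumulates the current segment in a buffer and flushes it at each cut index, so no sorting and no slicing happen at all.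
import Mathlib
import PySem

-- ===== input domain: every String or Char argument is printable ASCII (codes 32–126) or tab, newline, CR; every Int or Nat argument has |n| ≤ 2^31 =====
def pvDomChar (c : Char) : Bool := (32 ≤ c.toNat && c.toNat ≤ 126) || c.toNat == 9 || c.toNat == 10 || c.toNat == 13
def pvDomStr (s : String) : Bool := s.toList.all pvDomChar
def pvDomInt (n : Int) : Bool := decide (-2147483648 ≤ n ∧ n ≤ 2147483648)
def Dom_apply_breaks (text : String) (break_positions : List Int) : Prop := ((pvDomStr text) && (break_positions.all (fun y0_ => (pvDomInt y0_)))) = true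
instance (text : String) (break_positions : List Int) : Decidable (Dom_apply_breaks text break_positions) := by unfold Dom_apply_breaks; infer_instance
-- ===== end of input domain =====

-- B keeps A's blockquote preamble verbatim but replaces sort + slice-accumulator splitting by a
-- single character-streaming pass driven by a set of cut indices (alternative algorithm, no sort).

-- shared preamble helper: this code is textually identical in Python A and Python B
-- (blockquote detection, prefix extraction, content slicing, break-position shifting)

-- the 'while content_start_pos < len(text) and text[content_start_pos] == " "' loop
def pvSkipSpaces (text : List Char) (i : Nat) : Nat :=
  if h : i < text.length then
    if text[i] = ' ' then pvSkipSpaces text (i + 1) else i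
  else i
termination_by text.length - i

-- returns (text after prefix removal, is_blockquote, blockquote_prefix, adjusted break_positions)
def pvPreamble (text : List Char) (break_positions : List Int) :
    List Char × Bool × List Char × List Int :=
  let is_blockquote := PySem.Chars.startswith (PySem.Chars.strip text) ['>']
  if is_blockquote then
    let stripped := PySem.Chars.lstrip text
    let pre0 := PySem.List.slice text none (some ((text.length - stripped.length : Nat) : Int))
    if PySem.Chars.startswith stripped ['>'] then
      let csp := pvSkipSpaces text (text.length - stripped.length + 1)
      (PySem.List.slice text (some (csp : Int)) none, is_blockquote, pre0 ++ ['>', ' '],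
       (break_positions.filter (fun p => decide ((csp : Int) < p))).map (fun p => p - (csp : Int)))
    else (text, is_blockquote, pre0, break_positions)
  else (text, is_blockquote, [], break_positions)

-- ===== PORT A =====
-- A-side helpers: the body of A's 'for pos in sorted(break_positions)' loop, state (result, last_pos)
def pvStepA (t : List Char) (is_blockquote : Bool) (pre : List Char)
    (st : List (List Char) × Int) (pos : Int) : List (List Char) × Int :=
  let chunk := PySem.Chars.strip (PySem.List.slice t (some st.2) (some pos))
  if chunk ≠ [] then
    ((if is_blockquote then st.1 ++ [pre ++ chunk] else st.1 ++ [chunk]), pos)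
  else (st.1, pos)

def pvLoopA (t : List Char) (is_blockquote : Bool) (pre : List Char)
    (st : List (List Char) × Int) (pos : Int) : List (List Char) × Int :=
  if 0 < pos ∧ pos < PySem.List.len t then pvStepA t is_blockquote pre st pos else st

-- A's '# Add remaining text' tail code
def pvFinalA (t : List Char) (is_blockquote : Bool) (pre : List Char)
    (st : List (List Char) × Int) : List (List Char) :=
  if st.2 < PySem.List.len t then
    let chunk := PySem.Chars.strip (PySem.List.slice t (some st.2) none)
    if chunk ≠ [] then
      (if is_blockquote then st.1 ++ [pre ++ chunk] else st.1 ++ [chunk])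
    else st.1
  else st.1

def apply_breaks (text : String) (break_positions : List Int) : String :=
  if break_positions = [] then text
  else
    let r := pvPreamble text.toList break_positions
    let t := r.1
    let is_blockquote := r.2.1
    let pre := r.2.2.1
    let bps := r.2.2.2
    let st := (PySem.List.sorted bps (fun x => x) false).foldl (pvLoopA t is_blockquote pre) ([], 0)
    let result := pvFinalA t is_blockquote pre st
    if result = [] then text
    else String.ofList (PySem.Chars.join ['\n', '\n']
      (result.filter (fun part => PySem.Chars.strip part ≠ [])))

-- ===== PORT B =====
-- B-side helpers: the flush of the current buffer, and the body of B's 'for i, ch in enumerate(text)'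
def pvFlush (is_blockquote : Bool) (pre : List Char)
    (parts : List (List Char)) (buf : List Char) : List (List Char) :=
  let seg := PySem.Chars.strip buf
  if seg ≠ [] then
    parts ++ [if is_blockquote then pre ++ seg else seg]
  else parts

def pvStepB (cuts : PySem.Set Int) (is_blockquote : Bool) (pre : List Char)
    (st : List (List Char) × List Char) (ic : Int × Char) : List (List Char) × List Char :=
  if PySem.Set.contains cuts ic.1 then (pvFlush is_blockquote pre st.1 st.2, [ic.2])
  else (st.1, st.2 ++ [ic.2])

def apply_breaks_alt (text : String) (break_positions : List Int) : String :=
  if break_positions = [] then text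
  else
    let r := pvPreamble text.toList break_positions
    let t := r.1
    let is_blockquote := r.2.1
    let pre := r.2.2.1
    let bps := r.2.2.2
    let cuts : PySem.Set Int :=
      PySem.Set.ofList (bps.filter (fun p => decide (0 < p ∧ p < PySem.List.len t)))
    let st := (PySem.List.enumerate t 0).foldl (pvStepB cuts is_blockquote pre) ([], [])
    let parts := pvFlush is_blockquote pre st.1 st.2
    if parts = [] then text
    else String.ofList (PySem.Chars.join ['\n', '\n'] parts)

-- ===== PRECONDITION & SPEC =====
def Spec_apply_breaks (text : String) (break_positions : List Int) (out : String) : Prop := out = apply_breaks_alt text break_positions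
instance (text : String) (break_positions : List Int) (out : String) : Decidable (Spec_apply_breaks text break_positions out) := by unfold Spec_apply_breaks; infer_instance

-- ===== CLAIM (what is proved, stated in full; the proofs are below) =====
def Claim_equal_apply_breaks : Prop := ∀ (text : String) (break_positions : List Int), Dom_apply_breaks text break_positions → Spec_apply_breaks text break_positions (apply_breaks text break_positions)

-- ===== LEMMAS AND PROOFS =====

-- the decoration applied to each surviving chunk
def pvDec (is_blockquote : Bool) (pre c : List Char) : List Char :=
  if is_blockquote then pre ++ c else c

-- the stripped segments of t between consecutive boundaries a :: S, ending at len t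
def pvSegs (t : List Char) (a : Int) : List Int → List (List Char)
  | [] => [PySem.Chars.strip (PySem.List.slice t (some a) (some (PySem.List.len t)))]
  | p :: rest => PySem.Chars.strip (PySem.List.slice t (some a) (some p)) :: pvSegs t p rest

-- B's character scan, abstracted: split t (whose first char has index n) at the indices where q holds
def pvSplit (q : Int → Bool) : Int → List Char → List Char → List (List Char)
  | _, [], buf => [buf]
  | n, c :: cs, buf =>
    if q n then buf :: pvSplit q (n + 1) cs [c] else pvSplit q (n + 1) cs (buf ++ [c])

lemma pv_strip_eq_nil_iff (s : List Char) :
    PySem.Chars.strip s = [] ↔ ∀ x ∈ s, PySem.Chars.isspace x = true := by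
  simp only [PySem.Chars.strip, PySem.Chars.rstrip, PySem.Chars.lstrip,
    List.reverse_eq_nil_iff, List.dropWhile_eq_nil_iff, List.mem_reverse]
  constructor
  · intro h x hx
    rcases List.mem_append.mp (by rw [List.takeWhile_append_dropWhile]; exact hx :
        x ∈ s.takeWhile PySem.Chars.isspace ++ s.dropWhile PySem.Chars.isspace) with h1 | h1
    · exact List.mem_takeWhile_imp h1
    · exact h x h1
  · intro h x hx
    exact h x (List.Sublist.mem hx (List.dropWhile_sublist _))

lemma pv_strip_append_strip_ne_nil (q s : List Char) (h : PySem.Chars.strip s ≠ []) :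
    PySem.Chars.strip (q ++ PySem.Chars.strip s) ≠ [] := by
  have hex : ∃ x ∈ PySem.Chars.strip s, PySem.Chars.isspace x = false := by
    have hd : (PySem.Chars.lstrip s).reverse.dropWhile PySem.Chars.isspace ≠ [] := by
      simp only [PySem.Chars.strip, PySem.Chars.rstrip] at h
      simpa using h
    refine ⟨((PySem.Chars.lstrip s).reverse.dropWhile PySem.Chars.isspace).head hd, ?_, ?_⟩
    · simp only [PySem.Chars.strip, PySem.Chars.rstrip, List.mem_reverse]
      exact List.head_mem hd
    · exact List.head_dropWhile_not PySem.Chars.isspace hd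
  intro hc
  rw [pv_strip_eq_nil_iff] at hc
  obtain ⟨x, hx, hpx⟩ := hex
  have := hc x (List.mem_append_right _ hx)
  simp [this] at hpx

lemma pv_sorted_filter_comm (l : List Int) (q : Int → Bool) :
    PySem.List.sorted (l.filter q) (fun x => x) false
      = (PySem.List.sorted l (fun x => x) false).filter q := by
  apply PySem.List.sorted_id_eq_of_perm_of_pairwise
  · exact ((PySem.List.sorted_perm l (fun x => x) false).filter q)
  · exact (PySem.List.sorted_pairwise l (fun x => x)).filter q

lemma pv_slice_from_eq (t : List Char) (a : Int) (ha : 0 ≤ a) :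
    PySem.List.slice t (some a) none = PySem.List.slice t (some a) (some (PySem.List.len t)) := by
  rw [PySem.List.slice_from t ha, PySem.List.slice_toNat t ha (by simp [PySem.List.len_eq])]
  rw [List.take_of_length_le]
  simp [PySem.List.len_eq]

lemma pv_slice_past (t : List Char) (a : Int) (ha : PySem.List.len t ≤ a) (h0 : 0 ≤ a) :
    PySem.List.slice t (some a) (some (PySem.List.len t)) = [] := by
  rw [PySem.List.slice_toNat t h0 (by simp [PySem.List.len_eq])]
  have : t.length ≤ a.toNat := by
    simp [PySem.List.len_eq] at ha; omega
  simp [List.drop_eq_nil_of_le this]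

lemma pv_loop_closed (t pre : List Char) (is_blockquote : Bool) :
    ∀ (S : List Int) (acc : List (List Char)) (a : Int), 0 ≤ a →
      (∀ p ∈ S, 0 < p ∧ p < PySem.List.len t) →
      pvFinalA t is_blockquote pre (S.foldl (pvStepA t is_blockquote pre) (acc, a))
        = acc ++ ((pvSegs t a S).filter (fun c => c ≠ [])).map (pvDec is_blockquote pre) := by
  intro S
  induction S with
  | nil =>
    intro acc a ha _
    simp only [List.foldl_nil, pvFinalA, pvSegs, PySem.List.len_eq]
    by_cases hlt : a < (t.length : Int)
    · rw [if_pos hlt]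
      have hfe : PySem.List.slice t (some a) none
          = PySem.List.slice t (some a) (some ((t.length : Nat) : Int)) := by
        simpa [PySem.List.len_eq] using pv_slice_from_eq t a ha
      rw [hfe]
      by_cases hc : PySem.Chars.strip (PySem.List.slice t (some a) (some ((t.length : Nat) : Int))) = []
      · simp [hc]
      · by_cases hb : is_blockquote <;> simp [hb, hc, pvDec]
    · rw [if_neg hlt]
      have hsl : PySem.List.slice t (some a) (some ((t.length : Nat) : Int)) = [] := by
        simpa [PySem.List.len_eq] using pv_slice_past t a (by simp [PySem.List.len_eq]; omega) ha
      simp [hsl, PySem.Chars.strip, PySem.Chars.lstrip, PySem.Chars.rstrip]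
  | cons p rest ih =>
    intro acc a ha hmem
    obtain ⟨hp0, hpl⟩ := hmem p List.mem_cons_self
    have hrest : ∀ q ∈ rest, 0 < q ∧ q < PySem.List.len t := fun q hq => hmem q (List.mem_cons_of_mem _ hq)
    simp only [List.foldl_cons]
    have hstep : pvStepA t is_blockquote pre (acc, a) p
        = (acc ++ (if PySem.Chars.strip (PySem.List.slice t (some a) (some p)) = [] then []
            else [pvDec is_blockquote pre (PySem.Chars.strip (PySem.List.slice t (some a) (some p)))]), p) := by
      simp only [pvStepA, pvDec]
      by_cases hc : PySem.Chars.strip (PySem.List.slice t (some a) (some p)) = []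
      · simp [hc]
      · by_cases hb : is_blockquote <;> simp [hc, hb]
    rw [hstep, ih _ p (by omega) hrest]
    simp only [pvSegs, List.filter_cons]
    by_cases hc : PySem.Chars.strip (PySem.List.slice t (some a) (some p)) = []
    · simp [hc]
    · simp [hc, List.append_assoc]

lemma pv_segs_are_strips (t : List Char) :
    ∀ (S : List Int) (a : Int) (c : List Char), c ∈ pvSegs t a S → ∃ x, c = PySem.Chars.strip x := by
  intro S
  induction S with
  | nil => intro a c hc; simp [pvSegs] at hc; exact ⟨_, hc⟩
  | cons p rest ih =>
    intro a c hc
    rcases List.mem_cons.mp hc with h | h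
    · exact ⟨_, h⟩
    · exact ih p c h

-- A's whole splitting phase in closed form: segments of t between the sorted valid positions
lemma pvA_closed (t pre : List Char) (b : Bool) (bps' : List Int) :
    pvFinalA t b pre ((PySem.List.sorted bps' (fun x => x) false).foldl (pvLoopA t b pre) ([], 0))
    = ((pvSegs t 0 (PySem.List.sorted (bps'.filter (fun p => decide (0 < p ∧ p < PySem.List.len t))) (fun x => x) false)).filter
        (fun c => c ≠ [])).map (pvDec b pre) := by
  have hq : ∀ p ∈ PySem.List.sorted (bps'.filter (fun p => decide (0 < p ∧ p < PySem.List.len t))) (fun x => x) false,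
      0 < p ∧ p < PySem.List.len t := by
    intro p hp
    have := (PySem.List.mem_sorted _ _ _ _).mp hp
    simpa using (List.mem_filter.mp this).2
  have hL : pvLoopA t b pre
      = fun st pos => if 0 < pos ∧ pos < PySem.List.len t then pvStepA t b pre st pos else st := rfl
  rw [hL, PySem.List.foldl_ite_eq_foldl_filter (fun pos => 0 < pos ∧ pos < PySem.List.len t)
        (pvStepA t b pre) (PySem.List.sorted bps' (fun x => x) false) ([], 0),
      ← pv_sorted_filter_comm bps' (fun p => decide (0 < p ∧ p < PySem.List.len t)),
      pv_loop_closed t pre b _ [] 0 le_rfl hq]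
  simp

-- joining re-filter of A is the identity on the closed form
lemma pv_filter_strip_id (t pre : List Char) (b : Bool) (L : List Int) (a : Int) :
    (((pvSegs t a L).filter (fun c => c ≠ [])).map (pvDec b pre)).filter
        (fun part => PySem.Chars.strip part ≠ []) =
      ((pvSegs t a L).filter (fun c => c ≠ [])).map (pvDec b pre) := by
  apply List.filter_eq_self.mpr
  intro part hpart
  obtain ⟨seg, hseg, rfl⟩ := List.mem_map.mp hpart
  obtain ⟨hsegs, hne⟩ := List.mem_filter.mp hseg
  obtain ⟨x, rfl⟩ := pv_segs_are_strips t _ a _ hsegs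
  have hx : PySem.Chars.strip x ≠ [] := by simpa using hne
  cases b with
  | false =>
    have := pv_strip_append_strip_ne_nil [] x hx
    simpa [pvDec] using this
  | true =>
    simpa [pvDec] using pv_strip_append_strip_ne_nil pre x hx

-- slice concatenation at an interior boundary
lemma pv_slice_append (t : List Char) (a m bnd : Int) (h0 : 0 ≤ a) (h1 : a ≤ m) (h2 : m ≤ bnd) :
    PySem.List.slice t (some a) (some m) ++ PySem.List.slice t (some m) (some bnd)
      = PySem.List.slice t (some a) (some bnd) := by
  rw [PySem.List.slice_toNat t h0 (by omega), PySem.List.slice_toNat t (by omega) (by omega),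
      PySem.List.slice_toNat t h0 (by omega)]
  have hkey : bnd.toNat - a.toNat = (m.toNat - a.toNat) + (bnd.toNat - m.toNat) := by omega
  rw [hkey, List.take_add, List.drop_drop]
  have : a.toNat + (m.toNat - a.toNat) = m.toNat := by omega
  rw [this]

-- drop n is the slice from n to the end
lemma pv_drop_eq_slice (t : List Char) (n : Int) (h0 : 0 ≤ n) :
    t.drop n.toNat = PySem.List.slice t (some n) (some (PySem.List.len t)) := by
  rw [PySem.List.slice_toNat t h0 (by simp [PySem.List.len_eq]), List.take_of_length_le]
  simp [PySem.List.len_eq]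

-- B's fold over enumerate, flushed at the end, is pvSplit post-processed
lemma pv_scan (cuts : PySem.Set Int) (b : Bool) (pre : List Char) :
    ∀ (t : List Char) (n : Int) (parts : List (List Char)) (buf : List Char),
      pvFlush b pre
          ((PySem.List.enumerate t n).foldl (pvStepB cuts b pre) (parts, buf)).1
          ((PySem.List.enumerate t n).foldl (pvStepB cuts b pre) (parts, buf)).2
        = parts ++ (((pvSplit (fun i => PySem.Set.contains cuts i) n t buf).map
            PySem.Chars.strip).filter (fun c => c ≠ [])).map (pvDec b pre) := by
  intro t
  induction t with
  | nil =>
    intro n parts buf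
    simp only [PySem.List.enumerate_nil, List.foldl_nil, pvSplit, List.map_cons, List.map_nil,
      List.filter_cons, pvFlush]
    by_cases hc : PySem.Chars.strip buf = []
    · simp [hc]
    · by_cases hb : b <;> simp [hc, hb, pvDec]
  | cons c cs ih =>
    intro n parts buf
    rw [PySem.List.enumerate_cons]
    simp only [List.foldl_cons, pvSplit]
    by_cases hq : PySem.Set.contains cuts n
    · simp only [pvStepB, hq, if_pos]
      rw [ih (n + 1) (pvFlush b pre parts buf) [c]]
      simp only [List.map_cons, List.filter_cons, pvFlush]
      by_cases hc : PySem.Chars.strip buf = []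
      · simp [hc]
      · by_cases hb : b <;> simp [hc, hb, pvDec, List.append_assoc]
    · simp only [pvStepB, hq, Bool.false_eq_true, if_false]
      rw [ih (n + 1) parts (buf ++ [c])]

-- a scan region with no cut point accumulates one segment
lemma pv_split_no_cut (q : Int → Bool) :
    ∀ (t : List Char) (n : Int) (buf : List Char),
      (∀ i : Int, n ≤ i → i < n + t.length → q i = false) →
      pvSplit q n t buf = [buf ++ t] := by
  intro t
  induction t with
  | nil => intro n buf _; simp [pvSplit]
  | cons c cs ih =>
    intro n buf h
    have hlen : ((c :: cs).length : Int) = (cs.length : Int) + 1 := by simp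
    have hn : q n = false := h n le_rfl (by omega)
    simp only [pvSplit, hn, Bool.false_eq_true, if_false]
    rw [ih (n + 1) (buf ++ [c]) (fun i h1 h2 => h i (by omega) (by omega))]
    simp

-- peeling the first cut point off the scan
lemma pv_split_first_cut (q : Int → Bool) :
    ∀ (t : List Char) (n : Int) (buf : List Char) (p : Int),
      n ≤ p → p < n + t.length → q p = true →
      (∀ i : Int, n ≤ i → i < p → q i = false) →
      pvSplit q n t buf
        = (buf ++ t.take (p - n).toNat)
            :: pvSplit q (p + 1) (t.drop ((p - n).toNat + 1)) ((t.drop (p - n).toNat).take 1) := by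
  intro t
  induction t with
  | nil => intro n buf p h1 h2 _ _; simp at h2; omega
  | cons c cs ih =>
    intro n buf p h1 h2 hqp hbelow
    have hlen : ((c :: cs).length : Int) = (cs.length : Int) + 1 := by simp
    by_cases hnp : n = p
    · subst hnp
      simp only [pvSplit, hqp, if_true]
      simp
    · have hlt : n < p := lt_of_le_of_ne h1 hnp
      have hqn : q n = false := hbelow n le_rfl hlt
      simp only [pvSplit, hqn, Bool.false_eq_true, if_false]
      rw [ih (n + 1) (buf ++ [c]) p (by omega) (by omega) hqp
            (fun i ha hb => hbelow i (by omega) hb)]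
      have hk : (p - n).toNat = (p - (n + 1)).toNat + 1 := by omega
      rw [hk]
      simp [List.append_assoc]

-- the scan started at n with buf = t[a:n] yields exactly the slices between the cut points
lemma pv_split_main (T : List Char) (q : Int → Bool) :
    ∀ (D : List Int), D.Pairwise (· < ·) →
      ∀ (a n : Int), 0 ≤ a → a ≤ n → n ≤ (T.length : Int) →
        (∀ p ∈ D, n ≤ p ∧ p < (T.length : Int)) →
        (∀ i : Int, n ≤ i → i < (T.length : Int) → (q i = true ↔ i ∈ D)) →
        (pvSplit q n (T.drop n.toNat) (PySem.List.slice T (some a) (some n))).map PySem.Chars.strip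
          = pvSegs T a D := by
  intro D
  induction D with
  | nil =>
    intro _ a n h0 h1 h2 _ hagree
    have hlen : ((T.drop n.toNat).length : Int) = (T.length : Int) - n := by
      simp [List.length_drop]; omega
    rw [pv_split_no_cut q _ n _ ?_]
    · rw [pv_drop_eq_slice T n (by omega)]
      rw [pv_slice_append T a n (PySem.List.len T) h0 h1 (by simp [PySem.List.len_eq]; omega)]
      simp [pvSegs]
    · intro i hi1 hi2
      have h := hagree i hi1 (by omega)
      simp only [List.not_mem_nil, iff_false] at h
      exact Bool.eq_false_iff.mpr (fun hc => h hc)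
  | cons p D' ih =>
    intro hpw a n h0 h1 h2 hmem hagree
    have hlen : ((T.drop n.toNat).length : Int) = (T.length : Int) - n := by
      simp [List.length_drop]; omega
    obtain ⟨hnp, hplen⟩ := hmem p List.mem_cons_self
    have hD' : ∀ x ∈ D', p < x := by
      intro x hx; exact (List.pairwise_cons.mp hpw).1 x hx
    rw [pv_split_first_cut q _ n _ p hnp ?_ ?_ ?_]
    · have htake : (T.drop n.toNat).take (p - n).toNat = PySem.List.slice T (some n) (some p) := by
        rw [PySem.List.slice_toNat T (by omega) (by omega)]
        congr 1; omega
      have hdrop : (T.drop n.toNat).drop ((p - n).toNat + 1) = T.drop (p + 1).toNat := by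
        rw [List.drop_drop]; congr 1; omega
      have hbuf : ((T.drop n.toNat).drop (p - n).toNat).take 1
          = PySem.List.slice T (some p) (some (p + 1)) := by
        have e2 : n.toNat + (p - n).toNat = p.toNat := by omega
        have e3 : (p + 1).toNat - p.toNat = 1 := by omega
        rw [List.drop_drop, PySem.List.slice_toNat T (by omega : (0:Int) ≤ p) (by omega : (0:Int) ≤ p + 1)]
        simp only [e2, e3]
      rw [htake, pv_slice_append T a n p h0 h1 hnp, hdrop, hbuf]
      rw [List.map_cons]
      rw [ih (List.pairwise_cons.mp hpw).2 p (p + 1) (by omega) (by omega) (by omega) ?_ ?_]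
      · rfl
      · intro x hx
        have := hD' x hx
        have := (hmem x (List.mem_cons_of_mem _ hx)).2
        omega
      · intro i hi1 hi2
        rw [hagree i (by omega) hi2]
        constructor
        · intro h
          rcases List.mem_cons.mp h with h | h
          · omega
          · exact h
        · intro h; exact List.mem_cons_of_mem _ h
    · omega
    · exact (hagree p hnp hplen).mpr List.mem_cons_self
    · intro i hi1 hi2
      have hfalse : i ∉ p :: D' := by
        intro hc
        rcases List.mem_cons.mp hc with h | h
        · omega
        · have := hD' i h; omega
      have h := hagree i hi1 (by omega)
      exact Bool.eq_false_iff.mpr (fun hc => hfalse (h.mp hc))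

-- degenerate first boundary: an empty leading slice is filtered away
lemma pv_segs_filter_self (T : List Char) (a : Int) (h0 : 0 ≤ a) (L : List Int) :
    (pvSegs T a (a :: L)).filter (fun c => c ≠ []) = (pvSegs T a L).filter (fun c => c ≠ []) := by
  have hsl : PySem.List.slice T (some a) (some a) = [] := by
    rw [PySem.List.slice_toNat T h0 h0]; simp
  simp [pvSegs, hsl, PySem.Chars.strip, PySem.Chars.lstrip, PySem.Chars.rstrip]

-- duplicate elimination: the ≤-sorted boundary list and the <-sorted dedup give the same nonempty segments
lemma pv_segs_dedup (T : List Char) :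
    ∀ (L : List Int) (D : List Int) (a : Int), 0 ≤ a →
      L.Pairwise (· ≤ ·) → D.Pairwise (· < ·) →
      (∀ p ∈ L, a ≤ p) → (∀ p ∈ D, a < p) →
      (∀ x : Int, a < x → (x ∈ L ↔ x ∈ D)) →
      (pvSegs T a L).filter (fun c => c ≠ []) = (pvSegs T a D).filter (fun c => c ≠ []) := by
  intro L
  induction L with
  | nil =>
    intro D a _ _ _ _ hD hmem
    cases D with
    | nil => rfl
    | cons d D' =>
      exact absurd ((hmem d (hD d List.mem_cons_self)).mpr List.mem_cons_self) (List.not_mem_nil)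
  | cons p L' ih =>
    intro D a h0 hLpw hDpw hLge hDgt hmem
    have hpa : a ≤ p := hLge p List.mem_cons_self
    have hL'ge : ∀ x ∈ L', p ≤ x := fun x hx => (List.pairwise_cons.mp hLpw).1 x hx
    by_cases hap : a = p
    · subst hap
      rw [pv_segs_filter_self T a h0 L']
      apply ih D a h0 (List.pairwise_cons.mp hLpw).2 hDpw hL'ge hDgt
      intro x hx
      rw [← hmem x hx]
      constructor
      · intro h; exact List.mem_cons_of_mem _ h
      · intro h
        rcases List.mem_cons.mp h with h | h
        · omega
        · exact h
    · have hlt : a < p := lt_of_le_of_ne hpa hap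
      have hpD : p ∈ D := (hmem p hlt).mp List.mem_cons_self
      cases D with
      | nil => exact absurd hpD (List.not_mem_nil)
      | cons d D' =>
        have hD'gt : ∀ x ∈ D', d < x := fun x hx => (List.pairwise_cons.mp hDpw).1 x hx
        have hdp : d = p := by
          have hdL : d ∈ p :: L' := (hmem d (hDgt d List.mem_cons_self)).mpr List.mem_cons_self
          have hpd : p ≤ d := by
            rcases List.mem_cons.mp hdL with h | h
            · omega
            · exact hL'ge d h
          rcases List.mem_cons.mp hpD with h | h
          · omega
          · have := hD'gt p h; omega
        rw [hdp] at hD'gt hmem ⊢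
        simp only [pvSegs, List.filter_cons]
        have hrec : (pvSegs T p L').filter (fun c => c ≠ []) = (pvSegs T p D').filter (fun c => c ≠ []) := by
          apply ih D' p (by omega) (List.pairwise_cons.mp hLpw).2 (List.pairwise_cons.mp hDpw).2
            hL'ge hD'gt
          intro x hx
          constructor
          · intro h
            have : x ∈ p :: D' := (hmem x (by omega)).mp (List.mem_cons_of_mem _ h)
            rcases List.mem_cons.mp this with h | h
            · omega
            · exact h
          · intro h
            have : x ∈ p :: L' := (hmem x (by omega)).mpr (List.mem_cons_of_mem _ h)
            rcases List.mem_cons.mp this with h | h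
            · omega
            · exact h
        rw [hrec]

-- both splitting phases produce the same part list
lemma pv_parts_eq (t pre : List Char) (b : Bool) (bps' : List Int) :
    pvFinalA t b pre ((PySem.List.sorted bps' (fun x => x) false).foldl (pvLoopA t b pre) ([], 0))
    = pvFlush b pre
        ((PySem.List.enumerate t 0).foldl
          (pvStepB (PySem.Set.ofList (bps'.filter (fun p => decide (0 < p ∧ p < PySem.List.len t)))) b pre)
          ([], [])).1
        ((PySem.List.enumerate t 0).foldl
          (pvStepB (PySem.Set.ofList (bps'.filter (fun p => decide (0 < p ∧ p < PySem.List.len t)))) b pre)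
          ([], [])).2 := by
  have hFmem : ∀ p ∈ bps'.filter (fun p => decide (0 < p ∧ p < PySem.List.len t)),
      0 < p ∧ p < (t.length : Int) := by
    intro p hp
    have := (List.mem_filter.mp hp).2
    simpa [PySem.List.len_eq] using this
  have hDpw : (PySem.List.sorted (PySem.Set.ofList (bps'.filter (fun p => decide (0 < p ∧ p < PySem.List.len t)))) (fun x => x) false).Pairwise (· < ·) :=
    PySem.List.sorted_ofList_pairwise_lt _
  rw [pvA_closed t pre b bps', pv_scan _ b pre t 0 [] []]
  have h1 : (PySem.List.slice t (some 0) (some 0) : List Char) = [] := by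
    rw [PySem.List.slice_toNat t le_rfl le_rfl]; simp
  have h2 : t.drop (0 : Int).toNat = t := by simp
  have hsplit := pv_split_main t
      (fun i => PySem.Set.contains (PySem.Set.ofList (bps'.filter (fun p => decide (0 < p ∧ p < PySem.List.len t)))) i)
      (PySem.List.sorted (PySem.Set.ofList (bps'.filter (fun p => decide (0 < p ∧ p < PySem.List.len t)))) (fun x => x) false)
      hDpw 0 0 le_rfl le_rfl (by omega) ?_ ?_
  · rw [h1, h2] at hsplit
    rw [hsplit]
    rw [pv_segs_dedup t
          (PySem.List.sorted (bps'.filter (fun p => decide (0 < p ∧ p < PySem.List.len t))) (fun x => x) false)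
          (PySem.List.sorted (PySem.Set.ofList (bps'.filter (fun p => decide (0 < p ∧ p < PySem.List.len t)))) (fun x => x) false)
          0 le_rfl
          (by simpa using PySem.List.sorted_pairwise (bps'.filter (fun p => decide (0 < p ∧ p < PySem.List.len t))) (fun x => x))
          hDpw ?_ ?_ ?_]
    · simp
    · intro p hp
      have hpF : p ∈ bps'.filter (fun p => decide (0 < p ∧ p < PySem.List.len t)) := by
        simpa [PySem.List.mem_sorted] using hp
      exact le_of_lt (hFmem p hpF).1
    · intro p hp
      have hpF : p ∈ bps'.filter (fun p => decide (0 < p ∧ p < PySem.List.len t)) := by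
        simpa [PySem.List.mem_sorted, PySem.Set.mem_ofList] using hp
      exact (hFmem p hpF).1
    · intro x _
      simp [PySem.List.mem_sorted, PySem.Set.mem_ofList]
  · intro p hp
    have hpF : p ∈ bps'.filter (fun p => decide (0 < p ∧ p < PySem.List.len t)) := by
      simpa [PySem.List.mem_sorted, PySem.Set.mem_ofList] using hp
    have := hFmem p hpF
    omega
  · intro i _ _
    rw [PySem.Set.contains_iff, PySem.Set.mem_ofList]
    simp [PySem.List.mem_sorted, PySem.Set.mem_ofList]

-- the A-side join-time re-filter is the identity
lemma pv_final_filter (t pre : List Char) (b : Bool) (bps' : List Int) :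
    (pvFinalA t b pre ((PySem.List.sorted bps' (fun x => x) false).foldl (pvLoopA t b pre) ([], 0))).filter
        (fun part => PySem.Chars.strip part ≠ [])
      = pvFinalA t b pre ((PySem.List.sorted bps' (fun x => x) false).foldl (pvLoopA t b pre) ([], 0)) := by
  rw [pvA_closed, pv_filter_strip_id]

-- ===== VERDICT (by name: the statement is the Claim_ definition above) =====
theorem apply_breaks_spec : Claim_equal_apply_breaks := by
  intro text bps _
  unfold Spec_apply_breaks apply_breaks apply_breaks_alt
  by_cases hnil : bps = []
  · simp [hnil]
  · simp only [if_neg hnil]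
    rw [pv_final_filter (pvPreamble text.toList bps).1 (pvPreamble text.toList bps).2.2.1
          (pvPreamble text.toList bps).2.1 (pvPreamble text.toList bps).2.2.2,
        pv_parts_eq (pvPreamble text.toList bps).1 (pvPreamble text.toList bps).2.2.1
          (pvPreamble text.toList bps).2.1 (pvPreamble text.toList bps).2.2.2]
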